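-- pv_equiv track=rewrite | github.com/thirdlf03/ai-task-bot | src/utils/title_validator.py | infer_type_from_description
-- ===== SOURCE A (Python) =====
-- def infer_type_from_description(description: str) -> str:
--     """
--     Infer commit type from description text.
--
--     Args:
--         description: Description text
--
--     Returns:
--         Inferred type (defaults to 'feat')
--     """
--     description_lower = description.lower()
--
--     # Keyword-based inference
--     if any(word in description_lower for word in ["fix", "bug", "error", "issue"]):
--         return "fix"
--     elif any(word in description_lower for word in ["docs", "documentation", "readme"]):
--         return "docs"
--     elif any(word in description_lower for word in ["test", "testing"]):
--         return "test"
--     elif any(word in description_lower for word in ["refactor", "cleanup", "reorganize"]):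
--         return "refactor"
--     elif any(word in description_lower for word in ["performance", "optimize", "speed"]):
--         return "perf"
--     elif any(word in description_lower for word in ["style", "format", "lint"]):
--         return "style"
--     elif any(word in description_lower for word in ["ci", "pipeline", "deploy"]):
--         return "ci"
--     elif any(word in description_lower for word in ["build", "compile", "dependency"]):
--         return "build"
--     elif any(word in description_lower for word in ["chore", "maintenance"]):
--         return "chore"
--     else:
--         # Default to feat for new features
--         return "feat"
-- ===== SOURCE B (Python) =====
-- _KEYWORD_RANK = [
--     ("fix", 0), ("bug", 0), ("error", 0), ("issue", 0),
--     ("docs", 1), ("documentation", 1), ("readme", 1),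
--     ("test", 2), ("testing", 2),
--     ("refactor", 3), ("cleanup", 3), ("reorganize", 3),
--     ("performance", 4), ("optimize", 4), ("speed", 4),
--     ("style", 5), ("format", 5), ("lint", 5),
--     ("ci", 6), ("pipeline", 6), ("deploy", 6),
--     ("build", 7), ("compile", 7), ("dependency", 7),
--     ("chore", 8), ("maintenance", 8),
-- ]
-- _TYPES = ["fix", "docs", "test", "refactor", "perf", "style", "ci", "build", "chore", "feat"]
--
--
-- def infer_type_from_description(description: str) -> str:
--     # Single sliding-window scan: at every position of the lowercased text,
--     # check which keywords start there and keep the minimum (best-priority)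
--     # rank seen anywhere; no per-category substring searches, no early return.
--     s = description.lower()
--     best = 9
--     for i in range(len(s)):
--         for kw, rank in _KEYWORD_RANK:
--             if rank < best and s.startswith(kw, i):
--                 best = rank
--     return _TYPES[best]
-- ===== Notes on version B (the rewrite author's own statement) =====
-- stated objective: alternative
-- what changed: Instead of nine ordered any-substring tests with early return, B slides a window over the lowercased text once, checks at each position which ranked keywords start there, accumulates the minimum rank seen, and indexes a type table with it.
import Mathlib
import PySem

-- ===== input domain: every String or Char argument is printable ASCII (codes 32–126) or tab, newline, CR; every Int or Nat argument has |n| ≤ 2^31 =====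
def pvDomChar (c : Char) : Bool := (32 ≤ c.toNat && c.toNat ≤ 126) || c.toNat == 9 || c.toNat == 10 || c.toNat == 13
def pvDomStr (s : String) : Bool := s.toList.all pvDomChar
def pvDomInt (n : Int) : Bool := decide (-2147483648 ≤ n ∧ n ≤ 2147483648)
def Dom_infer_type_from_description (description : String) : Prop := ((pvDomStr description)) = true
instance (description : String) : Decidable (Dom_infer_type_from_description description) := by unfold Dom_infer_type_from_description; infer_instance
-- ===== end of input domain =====

-- B replaces A's nine ordered any-substring tests by one sliding-window scan of the
-- lowercased text that accumulates the minimum keyword rank; same behaviour, different algorithm.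

-- ===== PORT A =====
def infer_type_from_description (description : String) : String :=
  let description_lower := PySem.Str.lower description
  if ["fix", "bug", "error", "issue"].any (fun word => PySem.Str.isIn word description_lower) then "fix"
  else if ["docs", "documentation", "readme"].any (fun word => PySem.Str.isIn word description_lower) then "docs"
  else if ["test", "testing"].any (fun word => PySem.Str.isIn word description_lower) then "test"
  else if ["refactor", "cleanup", "reorganize"].any (fun word => PySem.Str.isIn word description_lower) then "refactor"
  else if ["performance", "optimize", "speed"].any (fun word => PySem.Str.isIn word description_lower) then "perf"
  else if ["style", "format", "lint"].any (fun word => PySem.Str.isIn word description_lower) then "style"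
  else if ["ci", "pipeline", "deploy"].any (fun word => PySem.Str.isIn word description_lower) then "ci"
  else if ["build", "compile", "dependency"].any (fun word => PySem.Str.isIn word description_lower) then "build"
  else if ["chore", "maintenance"].any (fun word => PySem.Str.isIn word description_lower) then "chore"
  else "feat"

-- ===== PORT B =====
def pvKeywordRank : List (String × Nat) :=
  [("fix", 0), ("bug", 0), ("error", 0), ("issue", 0),
   ("docs", 1), ("documentation", 1), ("readme", 1),
   ("test", 2), ("testing", 2),
   ("refactor", 3), ("cleanup", 3), ("reorganize", 3),
   ("performance", 4), ("optimize", 4), ("speed", 4),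
   ("style", 5), ("format", 5), ("lint", 5),
   ("ci", 6), ("pipeline", 6), ("deploy", 6),
   ("build", 7), ("compile", 7), ("dependency", 7),
   ("chore", 8), ("maintenance", 8)]

def pvTypes : List String :=
  ["fix", "docs", "test", "refactor", "perf", "style", "ci", "build", "chore", "feat"]

-- s.startswith(kw, i) with 0 ≤ i ≤ len(s) is exactly a prefix test on the i-th suffix.
def infer_type_from_description_alt (description : String) : String :=
  let s := (PySem.Str.lower description).toList
  let best := (List.range s.length).foldl
    (fun best i =>
      pvKeywordRank.foldl
        (fun best kr =>
          if kr.2 < best ∧ PySem.Chars.startswith (s.drop i) kr.1.toList then kr.2 else best)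
        best)
    9
  pvTypes.getD best "feat"   -- _TYPES[best]: best is always ≤ 9, plain indexing

-- ===== PRECONDITION & SPEC =====
def Spec_infer_type_from_description (description : String) (out : String) : Prop := out = infer_type_from_description_alt description
instance (description : String) (out : String) : Decidable (Spec_infer_type_from_description description out) := by unfold Spec_infer_type_from_description; infer_instance

-- ===== CLAIM =====
def Claim_equal_infer_type_from_description : Prop := ∀ (description : String), Dom_infer_type_from_description description → Spec_infer_type_from_description description (infer_type_from_description description)

-- ===== LEMMAS AND PROOFS =====

-- characterization of the inner fold (scan of the keyword table at one position)
theorem pvInner_char (s : List Char) (i : Nat) :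
    ∀ (l : List (String × Nat)) (b0 : Nat),
      (l.foldl (fun b kr => if kr.2 < b ∧ PySem.Chars.startswith (s.drop i) kr.1.toList then kr.2 else b) b0 = b0
        ∨ ∃ kr ∈ l, PySem.Chars.startswith (s.drop i) kr.1.toList = true
            ∧ l.foldl (fun b kr => if kr.2 < b ∧ PySem.Chars.startswith (s.drop i) kr.1.toList then kr.2 else b) b0 = kr.2)
      ∧ l.foldl (fun b kr => if kr.2 < b ∧ PySem.Chars.startswith (s.drop i) kr.1.toList then kr.2 else b) b0 ≤ b0
      ∧ ∀ kr ∈ l, PySem.Chars.startswith (s.drop i) kr.1.toList = true →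
          l.foldl (fun b kr => if kr.2 < b ∧ PySem.Chars.startswith (s.drop i) kr.1.toList then kr.2 else b) b0 ≤ kr.2 := by
  intro l
  induction l with
  | nil => intro b0; simp
  | cons kr0 tl ih =>
    intro b0
    simp only [List.foldl_cons]
    by_cases h : kr0.2 < b0 ∧ PySem.Chars.startswith (s.drop i) kr0.1.toList
    · rw [if_pos h]
      obtain ⟨h1, h2, h3⟩ := ih kr0.2
      refine ⟨?_, by omega, ?_⟩
      · rcases h1 with h1 | ⟨kr, hm, hs, he⟩
        · exact Or.inr ⟨kr0, List.mem_cons_self .., h.2, h1⟩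
        · exact Or.inr ⟨kr, List.mem_cons_of_mem _ hm, hs, he⟩
      · intro kr hm hs
        rcases List.mem_cons.mp hm with rfl | hm
        · exact h2
        · exact h3 kr hm hs
    · rw [if_neg h]
      obtain ⟨h1, h2, h3⟩ := ih b0
      refine ⟨?_, h2, ?_⟩
      · rcases h1 with h1 | ⟨kr, hm, hs, he⟩
        · exact Or.inl h1
        · exact Or.inr ⟨kr, List.mem_cons_of_mem _ hm, hs, he⟩
      · intro kr hm hs
        rcases List.mem_cons.mp hm with rfl | hm
        · rcases Nat.lt_or_ge kr.2 b0 with hlt | hge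
          · exact absurd ⟨hlt, hs⟩ h
          · omega
        · exact h3 kr hm hs

-- characterization of the whole nested scan
theorem pvScan_char (s : List Char) :
    ∀ (li : List Nat) (b0 : Nat),
      (li.foldl (fun b i => pvKeywordRank.foldl (fun b kr => if kr.2 < b ∧ PySem.Chars.startswith (s.drop i) kr.1.toList then kr.2 else b) b) b0 = b0
        ∨ ∃ i ∈ li, ∃ kr ∈ pvKeywordRank, PySem.Chars.startswith (s.drop i) kr.1.toList = true
            ∧ li.foldl (fun b i => pvKeywordRank.foldl (fun b kr => if kr.2 < b ∧ PySem.Chars.startswith (s.drop i) kr.1.toList then kr.2 else b) b) b0 = kr.2)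
      ∧ li.foldl (fun b i => pvKeywordRank.foldl (fun b kr => if kr.2 < b ∧ PySem.Chars.startswith (s.drop i) kr.1.toList then kr.2 else b) b) b0 ≤ b0
      ∧ ∀ i ∈ li, ∀ kr ∈ pvKeywordRank, PySem.Chars.startswith (s.drop i) kr.1.toList = true →
          li.foldl (fun b i => pvKeywordRank.foldl (fun b kr => if kr.2 < b ∧ PySem.Chars.startswith (s.drop i) kr.1.toList then kr.2 else b) b) b0 ≤ kr.2 := by
  intro li
  induction li with
  | nil => intro b0; simp
  | cons i0 tl ih =>
    intro b0
    simp only [List.foldl_cons]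
    obtain ⟨g1, g2, g3⟩ := pvInner_char s i0 pvKeywordRank b0
    obtain ⟨h1, h2, h3⟩ := ih (pvKeywordRank.foldl (fun b kr => if kr.2 < b ∧ PySem.Chars.startswith (s.drop i0) kr.1.toList then kr.2 else b) b0)
    refine ⟨?_, le_trans h2 g2, ?_⟩
    · rcases h1 with h1 | ⟨i, hi, kr, hm, hs, he⟩
      · rw [h1]
        rcases g1 with g1 | ⟨kr, hm, hs, he⟩
        · exact Or.inl g1
        · exact Or.inr ⟨i0, List.mem_cons_self .., kr, hm, hs, he⟩
      · exact Or.inr ⟨i, List.mem_cons_of_mem _ hi, kr, hm, hs, he⟩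
    · intro i hi kr hm hs
      rcases List.mem_cons.mp hi with rfl | hi
      · exact le_trans h2 (g3 kr hm hs)
      · exact h3 i hi kr hm hs

-- bridge: a nonempty keyword is a substring iff it starts at some scanned position
theorem pvPos_iff_isIn (s : List Char) (kw : List Char) (hne : kw ≠ []) :
    (∃ i ∈ List.range s.length, PySem.Chars.startswith (s.drop i) kw = true)
      ↔ PySem.Chars.isIn kw s = true := by
  rw [← PySem.Chars.exists_prefix_drop_iff_isIn]
  constructor
  · rintro ⟨i, _, hs⟩
    exact ⟨i, (PySem.Chars.startswith_iff _ _).mp hs⟩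
  · rintro ⟨j, hj⟩
    refine ⟨j, List.mem_range.mpr ?_, (PySem.Chars.startswith_iff _ _).mpr hj⟩
    by_contra hge
    have : s.drop j = [] := List.drop_eq_nil_of_le (by omega)
    rw [this] at hj
    exact hne (List.prefix_nil.mp hj)

-- ===== VERDICT =====
theorem infer_type_from_description_spec : Claim_equal_infer_type_from_description := by
  intro d _
  unfold Spec_infer_type_from_description infer_type_from_description infer_type_from_description_alt
  dsimp only
  set dl := PySem.Str.lower d with hdl
  set s := dl.toList with hs
  set r := (List.range s.length).foldl
    (fun b i => pvKeywordRank.foldl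
      (fun b kr => if kr.2 < b ∧ PySem.Chars.startswith (s.drop i) kr.1.toList then kr.2 else b) b) 9 with hr
  obtain ⟨h1, h2, h3⟩ := pvScan_char s (List.range s.length) 9
  have hne : ∀ kr ∈ pvKeywordRank, kr.1.toList ≠ [] := by decide
  have hub : ∀ kw rank, (kw, rank) ∈ pvKeywordRank → PySem.Chars.isIn kw.toList s = true → r ≤ rank := by
    intro kw rank hm hin
    obtain ⟨i, hi, hsw⟩ := (pvPos_iff_isIn s kw.toList (hne _ hm)).mpr hin
    exact h3 i hi (kw, rank) hm hsw
  have hlb : r = 9 ∨ ∃ kr ∈ pvKeywordRank, PySem.Chars.isIn kr.1.toList s = true ∧ r = kr.2 := by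
    rcases h1 with h | ⟨i, hi, kr, hm, hsw, he⟩
    · exact Or.inl h
    · exact Or.inr ⟨kr, hm, (pvPos_iff_isIn s kr.1.toList (hne _ hm)).mp ⟨i, hi, hsw⟩, he⟩
  clear h1 h2 h3 hne hr
  split_ifs with h0 h1 h2 h3 h4 h5 h6 h7 h8
  · -- branch 0
    have hup : r ≤ 0 := by
      simp only [List.any_cons, List.any_nil, Bool.or_eq_true, Bool.or_false, PySem.Str.isIn_eq] at h0
      rcases h0 with h|h|h|h
      · exact hub "fix" 0 (by simp [pvKeywordRank]) h
      · exact hub "bug" 0 (by simp [pvKeywordRank]) h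
      · exact hub "error" 0 (by simp [pvKeywordRank]) h
      · exact hub "issue" 0 (by simp [pvKeywordRank]) h
    have hrk : r = 0 := by omega
    rw [hrk]; rfl
  · -- branch 1
    have hup : r ≤ 1 := by
      simp only [List.any_cons, List.any_nil, Bool.or_eq_true, Bool.or_false, PySem.Str.isIn_eq] at h1
      rcases h1 with h|h|h
      · exact hub "docs" 1 (by simp [pvKeywordRank]) h
      · exact hub "documentation" 1 (by simp [pvKeywordRank]) h
      · exact hub "readme" 1 (by simp [pvKeywordRank]) h
    simp only [List.any_cons, List.any_nil, Bool.or_eq_true, Bool.or_false, not_or, PySem.Str.isIn_eq] at h0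
    have hlo : 1 ≤ r := by
      rcases hlb with h9 | ⟨kr, hm, hin, he⟩
      · omega
      · simp only [pvKeywordRank, List.mem_cons, List.not_mem_nil, or_false] at hm
        rcases hm with rfl|rfl|rfl|rfl|rfl|rfl|rfl|rfl|rfl|rfl|rfl|rfl|rfl|rfl|rfl|rfl|rfl|rfl|rfl|rfl|rfl|rfl|rfl|rfl|rfl|rfl|rfl
        · exact absurd hin h0.1
        · exact absurd hin h0.2.1
        · exact absurd hin h0.2.2.1
        · exact absurd hin h0.2.2.2
        · exact le_of_le_of_eq (by decide) he.symm
        · exact le_of_le_of_eq (by decide) he.symm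
        · exact le_of_le_of_eq (by decide) he.symm
        · exact le_of_le_of_eq (by decide) he.symm
        · exact le_of_le_of_eq (by decide) he.symm
        · exact le_of_le_of_eq (by decide) he.symm
        · exact le_of_le_of_eq (by decide) he.symm
        · exact le_of_le_of_eq (by decide) he.symm
        · exact le_of_le_of_eq (by decide) he.symm
        · exact le_of_le_of_eq (by decide) he.symm
        · exact le_of_le_of_eq (by decide) he.symm
        · exact le_of_le_of_eq (by decide) he.symm
        · exact le_of_le_of_eq (by decide) he.symm
        · exact le_of_le_of_eq (by decide) he.symm
        · exact le_of_le_of_eq (by decide) he.symm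
        · exact le_of_le_of_eq (by decide) he.symm
        · exact le_of_le_of_eq (by decide) he.symm
        · exact le_of_le_of_eq (by decide) he.symm
        · exact le_of_le_of_eq (by decide) he.symm
        · exact le_of_le_of_eq (by decide) he.symm
        · exact le_of_le_of_eq (by decide) he.symm
        · exact le_of_le_of_eq (by decide) he.symm
    have hrk : r = 1 := by omega
    rw [hrk]; rfl
  · -- branch 2
    have hup : r ≤ 2 := by
      simp only [List.any_cons, List.any_nil, Bool.or_eq_true, Bool.or_false, PySem.Str.isIn_eq] at h2
      rcases h2 with h|h
      · exact hub "test" 2 (by simp [pvKeywordRank]) h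
      · exact hub "testing" 2 (by simp [pvKeywordRank]) h
    simp only [List.any_cons, List.any_nil, Bool.or_eq_true, Bool.or_false, not_or, PySem.Str.isIn_eq] at h0 h1
    have hlo : 2 ≤ r := by
      rcases hlb with h9 | ⟨kr, hm, hin, he⟩
      · omega
      · simp only [pvKeywordRank, List.mem_cons, List.not_mem_nil, or_false] at hm
        rcases hm with rfl|rfl|rfl|rfl|rfl|rfl|rfl|rfl|rfl|rfl|rfl|rfl|rfl|rfl|rfl|rfl|rfl|rfl|rfl|rfl|rfl|rfl|rfl|rfl|rfl|rfl|rfl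
        · exact absurd hin h0.1
        · exact absurd hin h0.2.1
        · exact absurd hin h0.2.2.1
        · exact absurd hin h0.2.2.2
        · exact absurd hin h1.1
        · exact absurd hin h1.2.1
        · exact absurd hin h1.2.2
        · exact le_of_le_of_eq (by decide) he.symm
        · exact le_of_le_of_eq (by decide) he.symm
        · exact le_of_le_of_eq (by decide) he.symm
        · exact le_of_le_of_eq (by decide) he.symm
        · exact le_of_le_of_eq (by decide) he.symm
        · exact le_of_le_of_eq (by decide) he.symm
        · exact le_of_le_of_eq (by decide) he.symm
        · exact le_of_le_of_eq (by decide) he.symm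
        · exact le_of_le_of_eq (by decide) he.symm
        · exact le_of_le_of_eq (by decide) he.symm
        · exact le_of_le_of_eq (by decide) he.symm
        · exact le_of_le_of_eq (by decide) he.symm
        · exact le_of_le_of_eq (by decide) he.symm
        · exact le_of_le_of_eq (by decide) he.symm
        · exact le_of_le_of_eq (by decide) he.symm
        · exact le_of_le_of_eq (by decide) he.symm
        · exact le_of_le_of_eq (by decide) he.symm
        · exact le_of_le_of_eq (by decide) he.symm
        · exact le_of_le_of_eq (by decide) he.symm
    have hrk : r = 2 := by omega
    rw [hrk]; rfl
  · -- branch 3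
    have hup : r ≤ 3 := by
      simp only [List.any_cons, List.any_nil, Bool.or_eq_true, Bool.or_false, PySem.Str.isIn_eq] at h3
      rcases h3 with h|h|h
      · exact hub "refactor" 3 (by simp [pvKeywordRank]) h
      · exact hub "cleanup" 3 (by simp [pvKeywordRank]) h
      · exact hub "reorganize" 3 (by simp [pvKeywordRank]) h
    simp only [List.any_cons, List.any_nil, Bool.or_eq_true, Bool.or_false, not_or, PySem.Str.isIn_eq] at h0 h1 h2
    have hlo : 3 ≤ r := by
      rcases hlb with h9 | ⟨kr, hm, hin, he⟩
      · omega
      · simp only [pvKeywordRank, List.mem_cons, List.not_mem_nil, or_false] at hm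
        rcases hm with rfl|rfl|rfl|rfl|rfl|rfl|rfl|rfl|rfl|rfl|rfl|rfl|rfl|rfl|rfl|rfl|rfl|rfl|rfl|rfl|rfl|rfl|rfl|rfl|rfl|rfl|rfl
        · exact absurd hin h0.1
        · exact absurd hin h0.2.1
        · exact absurd hin h0.2.2.1
        · exact absurd hin h0.2.2.2
        · exact absurd hin h1.1
        · exact absurd hin h1.2.1
        · exact absurd hin h1.2.2
        · exact absurd hin h2.1
        · exact absurd hin h2.2
        · exact le_of_le_of_eq (by decide) he.symm
        · exact le_of_le_of_eq (by decide) he.symm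
        · exact le_of_le_of_eq (by decide) he.symm
        · exact le_of_le_of_eq (by decide) he.symm
        · exact le_of_le_of_eq (by decide) he.symm
        · exact le_of_le_of_eq (by decide) he.symm
        · exact le_of_le_of_eq (by decide) he.symm
        · exact le_of_le_of_eq (by decide) he.symm
        · exact le_of_le_of_eq (by decide) he.symm
        · exact le_of_le_of_eq (by decide) he.symm
        · exact le_of_le_of_eq (by decide) he.symm
        · exact le_of_le_of_eq (by decide) he.symm
        · exact le_of_le_of_eq (by decide) he.symm
        · exact le_of_le_of_eq (by decide) he.symm
        · exact le_of_le_of_eq (by decide) he.symm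
        · exact le_of_le_of_eq (by decide) he.symm
        · exact le_of_le_of_eq (by decide) he.symm
    have hrk : r = 3 := by omega
    rw [hrk]; rfl
  · -- branch 4
    have hup : r ≤ 4 := by
      simp only [List.any_cons, List.any_nil, Bool.or_eq_true, Bool.or_false, PySem.Str.isIn_eq] at h4
      rcases h4 with h|h|h
      · exact hub "performance" 4 (by simp [pvKeywordRank]) h
      · exact hub "optimize" 4 (by simp [pvKeywordRank]) h
      · exact hub "speed" 4 (by simp [pvKeywordRank]) h
    simp only [List.any_cons, List.any_nil, Bool.or_eq_true, Bool.or_false, not_or, PySem.Str.isIn_eq] at h0 h1 h2 h3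
    have hlo : 4 ≤ r := by
      rcases hlb with h9 | ⟨kr, hm, hin, he⟩
      · omega
      · simp only [pvKeywordRank, List.mem_cons, List.not_mem_nil, or_false] at hm
        rcases hm with rfl|rfl|rfl|rfl|rfl|rfl|rfl|rfl|rfl|rfl|rfl|rfl|rfl|rfl|rfl|rfl|rfl|rfl|rfl|rfl|rfl|rfl|rfl|rfl|rfl|rfl|rfl
        · exact absurd hin h0.1
        · exact absurd hin h0.2.1
        · exact absurd hin h0.2.2.1
        · exact absurd hin h0.2.2.2
        · exact absurd hin h1.1
        · exact absurd hin h1.2.1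
        · exact absurd hin h1.2.2
        · exact absurd hin h2.1
        · exact absurd hin h2.2
        · exact absurd hin h3.1
        · exact absurd hin h3.2.1
        · exact absurd hin h3.2.2
        · exact le_of_le_of_eq (by decide) he.symm
        · exact le_of_le_of_eq (by decide) he.symm
        · exact le_of_le_of_eq (by decide) he.symm
        · exact le_of_le_of_eq (by decide) he.symm
        · exact le_of_le_of_eq (by decide) he.symm
        · exact le_of_le_of_eq (by decide) he.symm
        · exact le_of_le_of_eq (by decide) he.symm
        · exact le_of_le_of_eq (by decide) he.symm
        · exact le_of_le_of_eq (by decide) he.symm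
        · exact le_of_le_of_eq (by decide) he.symm
        · exact le_of_le_of_eq (by decide) he.symm
        · exact le_of_le_of_eq (by decide) he.symm
        · exact le_of_le_of_eq (by decide) he.symm
        · exact le_of_le_of_eq (by decide) he.symm
    have hrk : r = 4 := by omega
    rw [hrk]; rfl
  · -- branch 5
    have hup : r ≤ 5 := by
      simp only [List.any_cons, List.any_nil, Bool.or_eq_true, Bool.or_false, PySem.Str.isIn_eq] at h5
      rcases h5 with h|h|h
      · exact hub "style" 5 (by simp [pvKeywordRank]) h
      · exact hub "format" 5 (by simp [pvKeywordRank]) h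
      · exact hub "lint" 5 (by simp [pvKeywordRank]) h
    simp only [List.any_cons, List.any_nil, Bool.or_eq_true, Bool.or_false, not_or, PySem.Str.isIn_eq] at h0 h1 h2 h3 h4
    have hlo : 5 ≤ r := by
      rcases hlb with h9 | ⟨kr, hm, hin, he⟩
      · omega
      · simp only [pvKeywordRank, List.mem_cons, List.not_mem_nil, or_false] at hm
        rcases hm with rfl|rfl|rfl|rfl|rfl|rfl|rfl|rfl|rfl|rfl|rfl|rfl|rfl|rfl|rfl|rfl|rfl|rfl|rfl|rfl|rfl|rfl|rfl|rfl|rfl|rfl|rfl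
        · exact absurd hin h0.1
        · exact absurd hin h0.2.1
        · exact absurd hin h0.2.2.1
        · exact absurd hin h0.2.2.2
        · exact absurd hin h1.1
        · exact absurd hin h1.2.1
        · exact absurd hin h1.2.2
        · exact absurd hin h2.1
        · exact absurd hin h2.2
        · exact absurd hin h3.1
        · exact absurd hin h3.2.1
        · exact absurd hin h3.2.2
        · exact absurd hin h4.1
        · exact absurd hin h4.2.1
        · exact absurd hin h4.2.2
        · exact le_of_le_of_eq (by decide) he.symm
        · exact le_of_le_of_eq (by decide) he.symm
        · exact le_of_le_of_eq (by decide) he.symm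
        · exact le_of_le_of_eq (by decide) he.symm
        · exact le_of_le_of_eq (by decide) he.symm
        · exact le_of_le_of_eq (by decide) he.symm
        · exact le_of_le_of_eq (by decide) he.symm
        · exact le_of_le_of_eq (by decide) he.symm
        · exact le_of_le_of_eq (by decide) he.symm
        · exact le_of_le_of_eq (by decide) he.symm
        · exact le_of_le_of_eq (by decide) he.symm
    have hrk : r = 5 := by omega
    rw [hrk]; rfl
  · -- branch 6
    have hup : r ≤ 6 := by
      simp only [List.any_cons, List.any_nil, Bool.or_eq_true, Bool.or_false, PySem.Str.isIn_eq] at h6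
      rcases h6 with h|h|h
      · exact hub "ci" 6 (by simp [pvKeywordRank]) h
      · exact hub "pipeline" 6 (by simp [pvKeywordRank]) h
      · exact hub "deploy" 6 (by simp [pvKeywordRank]) h
    simp only [List.any_cons, List.any_nil, Bool.or_eq_true, Bool.or_false, not_or, PySem.Str.isIn_eq] at h0 h1 h2 h3 h4 h5
    have hlo : 6 ≤ r := by
      rcases hlb with h9 | ⟨kr, hm, hin, he⟩
      · omega
      · simp only [pvKeywordRank, List.mem_cons, List.not_mem_nil, or_false] at hm
        rcases hm with rfl|rfl|rfl|rfl|rfl|rfl|rfl|rfl|rfl|rfl|rfl|rfl|rfl|rfl|rfl|rfl|rfl|rfl|rfl|rfl|rfl|rfl|rfl|rfl|rfl|rfl|rfl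
        · exact absurd hin h0.1
        · exact absurd hin h0.2.1
        · exact absurd hin h0.2.2.1
        · exact absurd hin h0.2.2.2
        · exact absurd hin h1.1
        · exact absurd hin h1.2.1
        · exact absurd hin h1.2.2
        · exact absurd hin h2.1
        · exact absurd hin h2.2
        · exact absurd hin h3.1
        · exact absurd hin h3.2.1
        · exact absurd hin h3.2.2
        · exact absurd hin h4.1
        · exact absurd hin h4.2.1
        · exact absurd hin h4.2.2
        · exact absurd hin h5.1
        · exact absurd hin h5.2.1
        · exact absurd hin h5.2.2
        · exact le_of_le_of_eq (by decide) he.symm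
        · exact le_of_le_of_eq (by decide) he.symm
        · exact le_of_le_of_eq (by decide) he.symm
        · exact le_of_le_of_eq (by decide) he.symm
        · exact le_of_le_of_eq (by decide) he.symm
        · exact le_of_le_of_eq (by decide) he.symm
        · exact le_of_le_of_eq (by decide) he.symm
        · exact le_of_le_of_eq (by decide) he.symm
    have hrk : r = 6 := by omega
    rw [hrk]; rfl
  · -- branch 7
    have hup : r ≤ 7 := by
      simp only [List.any_cons, List.any_nil, Bool.or_eq_true, Bool.or_false, PySem.Str.isIn_eq] at h7
      rcases h7 with h|h|h
      · exact hub "build" 7 (by simp [pvKeywordRank]) h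
      · exact hub "compile" 7 (by simp [pvKeywordRank]) h
      · exact hub "dependency" 7 (by simp [pvKeywordRank]) h
    simp only [List.any_cons, List.any_nil, Bool.or_eq_true, Bool.or_false, not_or, PySem.Str.isIn_eq] at h0 h1 h2 h3 h4 h5 h6
    have hlo : 7 ≤ r := by
      rcases hlb with h9 | ⟨kr, hm, hin, he⟩
      · omega
      · simp only [pvKeywordRank, List.mem_cons, List.not_mem_nil, or_false] at hm
        rcases hm with rfl|rfl|rfl|rfl|rfl|rfl|rfl|rfl|rfl|rfl|rfl|rfl|rfl|rfl|rfl|rfl|rfl|rfl|rfl|rfl|rfl|rfl|rfl|rfl|rfl|rfl|rfl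
        · exact absurd hin h0.1
        · exact absurd hin h0.2.1
        · exact absurd hin h0.2.2.1
        · exact absurd hin h0.2.2.2
        · exact absurd hin h1.1
        · exact absurd hin h1.2.1
        · exact absurd hin h1.2.2
        · exact absurd hin h2.1
        · exact absurd hin h2.2
        · exact absurd hin h3.1
        · exact absurd hin h3.2.1
        · exact absurd hin h3.2.2
        · exact absurd hin h4.1
        · exact absurd hin h4.2.1
        · exact absurd hin h4.2.2
        · exact absurd hin h5.1
        · exact absurd hin h5.2.1
        · exact absurd hin h5.2.2
        · exact absurd hin h6.1
        · exact absurd hin h6.2.1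
        · exact absurd hin h6.2.2
        · exact le_of_le_of_eq (by decide) he.symm
        · exact le_of_le_of_eq (by decide) he.symm
        · exact le_of_le_of_eq (by decide) he.symm
        · exact le_of_le_of_eq (by decide) he.symm
        · exact le_of_le_of_eq (by decide) he.symm
    have hrk : r = 7 := by omega
    rw [hrk]; rfl
  · -- branch 8
    have hup : r ≤ 8 := by
      simp only [List.any_cons, List.any_nil, Bool.or_eq_true, Bool.or_false, PySem.Str.isIn_eq] at h8
      rcases h8 with h|h
      · exact hub "chore" 8 (by simp [pvKeywordRank]) h
      · exact hub "maintenance" 8 (by simp [pvKeywordRank]) h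
    simp only [List.any_cons, List.any_nil, Bool.or_eq_true, Bool.or_false, not_or, PySem.Str.isIn_eq] at h0 h1 h2 h3 h4 h5 h6 h7
    have hlo : 8 ≤ r := by
      rcases hlb with h9 | ⟨kr, hm, hin, he⟩
      · omega
      · simp only [pvKeywordRank, List.mem_cons, List.not_mem_nil, or_false] at hm
        rcases hm with rfl|rfl|rfl|rfl|rfl|rfl|rfl|rfl|rfl|rfl|rfl|rfl|rfl|rfl|rfl|rfl|rfl|rfl|rfl|rfl|rfl|rfl|rfl|rfl|rfl|rfl|rfl
        · exact absurd hin h0.1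
        · exact absurd hin h0.2.1
        · exact absurd hin h0.2.2.1
        · exact absurd hin h0.2.2.2
        · exact absurd hin h1.1
        · exact absurd hin h1.2.1
        · exact absurd hin h1.2.2
        · exact absurd hin h2.1
        · exact absurd hin h2.2
        · exact absurd hin h3.1
        · exact absurd hin h3.2.1
        · exact absurd hin h3.2.2
        · exact absurd hin h4.1
        · exact absurd hin h4.2.1
        · exact absurd hin h4.2.2
        · exact absurd hin h5.1
        · exact absurd hin h5.2.1
        · exact absurd hin h5.2.2
        · exact absurd hin h6.1
        · exact absurd hin h6.2.1
        · exact absurd hin h6.2.2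
        · exact absurd hin h7.1
        · exact absurd hin h7.2.1
        · exact absurd hin h7.2.2
        · exact le_of_le_of_eq (by decide) he.symm
        · exact le_of_le_of_eq (by decide) he.symm
    have hrk : r = 8 := by omega
    rw [hrk]; rfl
  · -- fallback branch: nothing matches, r = 9
    simp only [List.any_cons, List.any_nil, Bool.or_eq_true, Bool.or_false, not_or, PySem.Str.isIn_eq] at h0 h1 h2 h3 h4 h5 h6 h7 h8
    have hrk : r = 9 := by
      rcases hlb with h9 | ⟨kr, hm, hin, he⟩
      · exact h9
      · simp only [pvKeywordRank, List.mem_cons, List.not_mem_nil, or_false] at hm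
        rcases hm with rfl|rfl|rfl|rfl|rfl|rfl|rfl|rfl|rfl|rfl|rfl|rfl|rfl|rfl|rfl|rfl|rfl|rfl|rfl|rfl|rfl|rfl|rfl|rfl|rfl|rfl|rfl
        · exact absurd hin h0.1
        · exact absurd hin h0.2.1
        · exact absurd hin h0.2.2.1
        · exact absurd hin h0.2.2.2
        · exact absurd hin h1.1
        · exact absurd hin h1.2.1
        · exact absurd hin h1.2.2
        · exact absurd hin h2.1
        · exact absurd hin h2.2
        · exact absurd hin h3.1
        · exact absurd hin h3.2.1
        · exact absurd hin h3.2.2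
        · exact absurd hin h4.1
        · exact absurd hin h4.2.1
        · exact absurd hin h4.2.2
        · exact absurd hin h5.1
        · exact absurd hin h5.2.1
        · exact absurd hin h5.2.2
        · exact absurd hin h6.1
        · exact absurd hin h6.2.1
        · exact absurd hin h6.2.2
        · exact absurd hin h7.1
        · exact absurd hin h7.2.1
        · exact absurd hin h7.2.2
        · exact absurd hin h8.1
        · exact absurd hin h8.2
    rw [hrk]; rfl
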